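-- pv_equiv track=rewrite | github.com/plerin/solveThePS | Daily/211129/동물원_1309.py | solve
-- ===== SOURCE A (Python) =====
-- MOD = 9901
--
-- def solve(n: int):
--     dp = [[0 for _ in range(3)] for _ in range(n+1)]
--
--     dp[1] = [1, 1, 1]
--
--     for i in range(2, n+1):
--         dp[i][0] = (dp[i-1][1] + dp[i-1][2]) % MOD
--         dp[i][1] = (dp[i-1][0] + dp[i-1][2]) % MOD
--         dp[i][2] = (dp[i-1][0] + dp[i-1][1] + dp[i-1][2]) % MOD
--
--     return sum(dp[n]) % MOD
-- ===== SOURCE B (Python) =====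
-- MOD = 9901
--
-- def solve(n: int):
--     # O(log n): binary exponentiation of the 2x2 matrix [[2,1],[1,0]] mod 9901
--     # (the answer t(n) satisfies t(n) = 2*t(n-1) + t(n-2), t(1) = 3, t(2) = 7).
--     def mul(A, B):
--         a, b, c, d = A
--         e, f, g, h = B
--         return ((a*e + b*g) % MOD, (a*f + b*h) % MOD,
--                 (c*e + d*g) % MOD, (c*f + d*h) % MOD)
--     R = (1, 0, 0, 1)
--     M = (2, 1, 1, 0)
--     k = n - 1
--     while k > 0:
--         if k % 2 == 1:
--             R = mul(R, M)
--         M = mul(M, M)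
--         k //= 2
--     a, b, _, _ = R
--     return (3*a + b) % MOD
-- ===== Notes on version B (the rewrite author's own statement) =====
-- stated objective: faster
-- what changed: Replaces the O(n) three-state DP table with binary exponentiation of the 2x2 matrix [[2,1],[1,0]] mod 9901 (the answer satisfies t(n)=2t(n-1)+t(n-2)).
import Mathlib
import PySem

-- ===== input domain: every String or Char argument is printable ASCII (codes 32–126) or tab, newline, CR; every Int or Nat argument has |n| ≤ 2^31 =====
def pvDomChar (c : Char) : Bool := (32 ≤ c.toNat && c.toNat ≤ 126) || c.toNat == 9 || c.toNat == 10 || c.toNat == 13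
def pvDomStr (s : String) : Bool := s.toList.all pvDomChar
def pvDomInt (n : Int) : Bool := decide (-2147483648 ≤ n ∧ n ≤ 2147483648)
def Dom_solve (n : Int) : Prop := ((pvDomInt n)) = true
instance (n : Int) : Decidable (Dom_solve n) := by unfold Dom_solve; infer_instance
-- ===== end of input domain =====

-- B replaces A's O(n) three-state DP table with O(log n) binary exponentiation
-- of the 2x2 matrix [[2,1],[1,0]] mod 9901.

-- ===== PORT A =====
-- Python's dp list of rows is held as an Array (O(1) read/update); indexing is
-- ported by hand with Python's negative-wrap rule via PySem.List.pyIdx? (exact: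
-- same index normalisation, out-of-range reads/writes keep the IndexError inputs
-- outside Pre_solve below).
def aGet (dp : Array (List Int)) (i : Int) : List Int :=
  ((PySem.List.pyIdx? dp.size i).bind (fun k => dp[k]?)).getD []

def aSet (dp : Array (List Int)) (i : Int) (v : List Int) : Array (List Int) :=
  ((PySem.List.pyIdx? dp.size i).map (fun k => dp.setIfInBounds k v)).getD dp

-- one iteration of A's 'for i in range(2, n+1)' body (three in-place row writes)
def stepA (dp : Array (List Int)) (i : Int) : Array (List Int) :=
  let d0 := (PySem.List.pyGetD (aGet dp (i-1)) 1 0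
           + PySem.List.pyGetD (aGet dp (i-1)) 2 0) % 9901
  let dp := aSet dp i (PySem.List.pySetD (aGet dp i) 0 d0)
  let d1 := (PySem.List.pyGetD (aGet dp (i-1)) 0 0
           + PySem.List.pyGetD (aGet dp (i-1)) 2 0) % 9901
  let dp := aSet dp i (PySem.List.pySetD (aGet dp i) 1 d1)
  let d2 := (PySem.List.pyGetD (aGet dp (i-1)) 0 0
           + PySem.List.pyGetD (aGet dp (i-1)) 1 0
           + PySem.List.pyGetD (aGet dp (i-1)) 2 0) % 9901
  aSet dp i (PySem.List.pySetD (aGet dp i) 2 d2)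

def solve (n : Int) : Int :=
  let dp : Array (List Int) :=
    ((PySem.List.pyRange 0 (n+1) 1).map
      (fun _ => (PySem.List.pyRange 0 3 1).map (fun _ => (0:Int)))).toArray
  let dp := aSet dp 1 [1, 1, 1]
  let dp := (PySem.List.pyRange 2 (n+1) 1).foldl stepA dp
  (aGet dp n).sum % 9901

-- ===== PORT B =====
def mulM (A B : Int × Int × Int × Int) : Int × Int × Int × Int :=
  match A, B with
  | (a, b, c, d), (e, f, g, h) =>
    ((a*e + b*g) % 9901, (a*f + b*h) % 9901, (c*e + d*g) % 9901, (c*f + d*h) % 9901)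

-- the 'while k > 0' loop of B (k only decreases through k //= 2, so Nat fuel = k itself)
def powM (R M : Int × Int × Int × Int) (k : Nat) : Int × Int × Int × Int :=
  if h : k = 0 then R
  else powM (if k % 2 = 1 then mulM R M else R) (mulM M M) (k / 2)
  decreasing_by exact Nat.div_lt_self (Nat.pos_of_ne_zero h) one_lt_two

def solve_alt (n : Int) : Int :=
  match powM (1, 0, 0, 1) (2, 1, 1, 0) (n - 1).toNat with
  | (a, b, _, _) => (3*a + b) % 9901

-- ===== PRECONDITION & SPEC =====
-- A raises IndexError (dp[1] on a list of length ≤ 1) for every n ≤ 0; it returns exactly on n ≥ 1.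
def Pre_solve (n : Int) : Prop := 1 ≤ n
instance (n : Int) : Decidable (Pre_solve n) := by unfold Pre_solve; infer_instance
def pvWitness_solve : Int := 5

def Spec_solve (n : Int) (out : Int) : Prop := out = solve_alt n
instance (n : Int) (out : Int) : Decidable (Spec_solve n out) := by unfold Spec_solve; infer_instance

-- ===== CLAIM (what is proved, stated in full; the proofs are below) =====
def Claim_equal_solve : Prop := ∀ (n : Int), Dom_solve n → Pre_solve n → Spec_solve n (solve n)

-- ===== LEMMAS AND PROOFS =====

-- the triple dp[i] as a function of i (index shifted: trip k ↔ dp[k+1])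
def trip : Nat → Int × Int × Int
  | 0 => (1, 1, 1)
  | k+1 =>
    match trip k with
    | (a, b, c) => ((b + c) % 9901, (a + c) % 9901, (a + b + c) % 9901)

def tripRow (k : Nat) : List Int := [(trip k).1, (trip k).2.1, (trip k).2.2]

-- the half-companion Pell sequence mod 9901
def u : Nat → ZMod 9901
  | 0 => 0
  | 1 => 1
  | k+2 => 2 * u (k+1) + u k

def castM (A : Int × Int × Int × Int) : ZMod 9901 × ZMod 9901 × ZMod 9901 × ZMod 9901 :=
  ((A.1 : ZMod 9901), (A.2.1 : ZMod 9901), (A.2.2.1 : ZMod 9901), (A.2.2.2 : ZMod 9901))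

def mulZ (A B : ZMod 9901 × ZMod 9901 × ZMod 9901 × ZMod 9901) :
    ZMod 9901 × ZMod 9901 × ZMod 9901 × ZMod 9901 :=
  match A, B with
  | (a, b, c, d), (e, f, g, h) => (a*e + b*g, a*f + b*h, c*e + d*g, c*f + d*h)

def mpow (M : ZMod 9901 × ZMod 9901 × ZMod 9901 × ZMod 9901) :
    Nat → ZMod 9901 × ZMod 9901 × ZMod 9901 × ZMod 9901
  | 0 => (1, 0, 0, 1)
  | k+1 => mulZ (mpow M k) M

theorem mulZ_assoc (A B C : ZMod 9901 × ZMod 9901 × ZMod 9901 × ZMod 9901) :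
    mulZ (mulZ A B) C = mulZ A (mulZ B C) := by
  obtain ⟨a, b, c, d⟩ := A; obtain ⟨e, f, g, h⟩ := B; obtain ⟨i, j, k, l⟩ := C
  simp only [mulZ, Prod.mk.injEq]
  refine ⟨by ring, by ring, by ring, by ring⟩

theorem mulZ_one_left (A : ZMod 9901 × ZMod 9901 × ZMod 9901 × ZMod 9901) :
    mulZ (1, 0, 0, 1) A = A := by
  obtain ⟨a, b, c, d⟩ := A
  simp only [mulZ, Prod.mk.injEq]
  refine ⟨by ring, by ring, by ring, by ring⟩

theorem castM_mul (A B : Int × Int × Int × Int) :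
    castM (mulM A B) = mulZ (castM A) (castM B) := by
  obtain ⟨a, b, c, d⟩ := A; obtain ⟨e, f, g, h⟩ := B
  simp only [castM, mulM, mulZ, Prod.mk.injEq]
  refine ⟨?_, ?_, ?_, ?_⟩ <;>
    · rw [show ((9901 : Int)) = ((9901 : Nat) : Int) from rfl, ZMod.intCast_mod]
      push_cast; ring

theorem mpow_mul_comm (M : ZMod 9901 × ZMod 9901 × ZMod 9901 × ZMod 9901) (k : Nat) :
    mulZ M (mpow M k) = mulZ (mpow M k) M := by
  induction k with
  | zero => rw [mpow, mulZ_one_left]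
            obtain ⟨a, b, c, d⟩ := M
            simp only [mulZ, Prod.mk.injEq]
            refine ⟨by ring, by ring, by ring, by ring⟩
  | succ k ih => rw [mpow, ← mulZ_assoc, ih]

theorem mpow_sq (M : ZMod 9901 × ZMod 9901 × ZMod 9901 × ZMod 9901) (j : Nat) :
    mpow (mulZ M M) j = mpow M (2 * j) := by
  induction j with
  | zero => rfl
  | succ j ih =>
    rw [mpow, ih, show 2 * (j + 1) = 2 * j + 1 + 1 from rfl, mpow, mpow, mulZ_assoc]

theorem powM_cast (k : Nat) : ∀ R M : Int × Int × Int × Int,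
    castM (powM R M k) = mulZ (castM R) (mpow (castM M) k) := by
  induction k using Nat.strong_induction_on with
  | _ k ih =>
    intro R M
    rw [powM]
    by_cases hk : k = 0
    · simp only [hk, dif_pos]
      rw [mpow]
      obtain ⟨a, b, c, d⟩ := R
      simp only [castM, mulZ, Prod.mk.injEq]
      refine ⟨by ring, by ring, by ring, by ring⟩
    · simp only [hk, dif_neg, not_false_iff]
      rw [ih (k / 2) (Nat.div_lt_self (Nat.pos_of_ne_zero hk) one_lt_two), castM_mul,
        mpow_sq]
      by_cases hp : k % 2 = 1
      · simp only [hp, if_pos]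
        rw [castM_mul]
        have hk2 : k = 2 * (k / 2) + 1 := by omega
        conv_rhs => rw [hk2, mpow, ← mpow_mul_comm, ← mulZ_assoc]
      · simp only [hp, if_neg, not_false_iff]
        have hk2 : k = 2 * (k / 2) := by omega
        rw [← hk2]

theorem u_rec (k : Nat) : u (k + 2) = 2 * u (k + 1) + u k := rfl

theorem mpow_entries (k : Nat) :
    mpow (2, 1, 1, 0) k = (u (k+1), u k, u k, u (k+1) - 2 * u k) := by
  induction k with
  | zero => simp [mpow, u]
  | succ k ih =>
    rw [mpow, ih]
    simp only [mulZ, Prod.mk.injEq]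
    refine ⟨by rw [u_rec]; ring, by ring, by ring, by rw [u_rec]; ring⟩

theorem trip_cast (k : Nat) :
    ((trip k).1 : ZMod 9901) = u (k+1) ∧ ((trip k).2.1 : ZMod 9901) = u (k+1) ∧
      ((trip k).2.2 : ZMod 9901) = u k + u (k+1) := by
  induction k with
  | zero => simp [trip, u]
  | succ k ih =>
    obtain ⟨h1, h2, h3⟩ := ih
    rcases ht : trip k with ⟨a, b, c⟩
    rw [ht] at h1 h2 h3
    rw [show trip (k+1) = ((b + c) % 9901, (a + c) % 9901, (a + b + c) % 9901) from by
      rw [trip, ht]]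
    refine ⟨?_, ?_, ?_⟩ <;>
        rw [show ((9901 : Int)) = ((9901 : Nat) : Int) from rfl, ZMod.intCast_mod]
    · push_cast; rw [h2, h3, u_rec]; ring
    · push_cast; rw [h1, h3, u_rec]; ring
    · push_cast; rw [h1, h2, h3, u_rec]; ring

theorem solve_alt_cast (n : Int) :
    ((solve_alt n : Int) : ZMod 9901) = 3 * u ((n-1).toNat + 1) + u ((n-1).toNat) := by
  have h := powM_cast (n-1).toNat (1,0,0,1) (2,1,1,0)
  rw [show castM (1,0,0,1) = (1,0,0,1) from by simp [castM],
      show castM (2,1,1,0) = ((2 : ZMod 9901),1,1,0) from by simp [castM],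
      mulZ_one_left, mpow_entries] at h
  unfold solve_alt
  rcases hp : powM (1,0,0,1) (2,1,1,0) (n-1).toNat with ⟨a,b,c,d⟩
  rw [hp] at h
  simp only [castM, Prod.mk.injEq] at h
  obtain ⟨ha, hb, -, -⟩ := h
  rw [show ((9901 : Int)) = ((9901 : Nat) : Int) from rfl, ZMod.intCast_mod]
  push_cast
  rw [ha, hb]

-- list-level mirror of one loop iteration, and the Array ↔ List bridge
def stepL (dp : List (List Int)) (i : Int) : List (List Int) :=
  let d0 := (PySem.List.pyGetD (PySem.List.pyGetD dp (i-1) []) 1 0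
           + PySem.List.pyGetD (PySem.List.pyGetD dp (i-1) []) 2 0) % 9901
  let dp := PySem.List.pySetD dp i (PySem.List.pySetD (PySem.List.pyGetD dp i []) 0 d0)
  let d1 := (PySem.List.pyGetD (PySem.List.pyGetD dp (i-1) []) 0 0
           + PySem.List.pyGetD (PySem.List.pyGetD dp (i-1) []) 2 0) % 9901
  let dp := PySem.List.pySetD dp i (PySem.List.pySetD (PySem.List.pyGetD dp i []) 1 d1)
  let d2 := (PySem.List.pyGetD (PySem.List.pyGetD dp (i-1) []) 0 0
           + PySem.List.pyGetD (PySem.List.pyGetD dp (i-1) []) 1 0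
           + PySem.List.pyGetD (PySem.List.pyGetD dp (i-1) []) 2 0) % 9901
  PySem.List.pySetD dp i (PySem.List.pySetD (PySem.List.pyGetD dp i []) 2 d2)

theorem aGet_toArray (l : List (List Int)) (i : Int) :
    aGet l.toArray i = PySem.List.pyGetD l i [] := by
  simp [aGet, PySem.List.pyGetD, PySem.List.pyGet?]

theorem pyIdx?_lt (n : Nat) (i : Int) (k : Nat) (h : PySem.List.pyIdx? n i = some k) :
    k < n := by
  unfold PySem.List.pyIdx? at h
  split_ifs at h <;> simp_all <;> omega

theorem aSet_toArray (l : List (List Int)) (i : Int) (v : List Int) :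
    aSet l.toArray i v = (PySem.List.pySetD l i v).toArray := by
  unfold aSet PySem.List.pySetD PySem.List.pySet?
  rcases h : PySem.List.pyIdx? l.length i with _ | k
  · simp
  · have hk := pyIdx?_lt _ _ _ h
    simp [Array.setIfInBounds, hk]

theorem stepA_toArray (l : List (List Int)) (i : Int) :
    stepA l.toArray i = (stepL l i).toArray := by
  simp only [stepA, stepL, aGet_toArray, aSet_toArray]

theorem foldl_stepA_toArray (r : List Int) : ∀ l : List (List Int),
    r.foldl stepA l.toArray = (r.foldl stepL l).toArray := by
  induction r with
  | nil => intro l; rfl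
  | cons x r ih => intro l; rw [List.foldl_cons, List.foldl_cons, stepA_toArray, ih]

-- row-level index/update facts (Python inner indices are the literals 0,1,2)
theorem getRow0 (a b c : Int) : PySem.List.pyGetD [a,b,c] 0 0 = a := by
  rw [show (0:Int) = ((0:Nat):Int) from rfl, PySem.List.pyGetD_natCast]; rfl
theorem getRow1 (a b c : Int) : PySem.List.pyGetD [a,b,c] 1 0 = b := by
  rw [show (1:Int) = ((1:Nat):Int) from rfl, PySem.List.pyGetD_natCast]; rfl
theorem getRow2 (a b c : Int) : PySem.List.pyGetD [a,b,c] 2 0 = c := by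
  rw [show (2:Int) = ((2:Nat):Int) from rfl, PySem.List.pyGetD_natCast]; rfl
theorem setRow0 (a b c v : Int) : PySem.List.pySetD [a,b,c] 0 v = [v,b,c] := by
  rw [show (0:Int) = ((0:Nat):Int) from rfl, PySem.List.pySetD_natCast]; rfl
theorem setRow1 (a b c v : Int) : PySem.List.pySetD [a,b,c] 1 v = [a,v,c] := by
  rw [show (1:Int) = ((1:Nat):Int) from rfl, PySem.List.pySetD_natCast]; rfl
theorem setRow2 (a b c v : Int) : PySem.List.pySetD [a,b,c] 2 v = [a,b,v] := by
  rw [show (2:Int) = ((2:Nat):Int) from rfl, PySem.List.pySetD_natCast]; rfl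

-- one loop iteration at i = m+1 rewrites row m+1 to tripRow m
theorem stepL_set (dp : List (List Int)) (m : Nat) (h1 : 1 ≤ m)
    (hlen : m + 1 < dp.length)
    (hprev : dp.getD m [] = tripRow (m-1))
    (hcur : dp.getD (m+1) [] = [0,0,0]) :
    stepL dp ((m:Int)+1) = dp.set (m+1) (tripRow m) := by
  rcases ht : trip (m-1) with ⟨a, b, c⟩
  have hprev' : dp.getD m [] = [a, b, c] := by rw [hprev, tripRow, ht]
  have htm : trip m = ((b + c) % 9901, (a + c) % 9901, (a + b + c) % 9901) := by
    rw [show m = (m-1)+1 from by omega, trip, ht]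
  have hmlt : m < dp.length := by omega
  unfold stepL
  rw [show ((m:Int) + 1) = (((m+1 : Nat)):Int) from by push_cast; ring]
  rw [show (((m+1 : Nat)):Int) - 1 = ((m:Nat):Int) from by push_cast; ring]
  simp only [PySem.List.pyGetD_natCast, PySem.List.pySetD_natCast, hprev', hcur,
    getRow1, getRow2, setRow0]
  have hset : ∀ v : List Int, (dp.set (m+1) v).getD m [] = [a, b, c] := by
    intro v
    rw [List.getD_eq_getElem _ _ (by simp [List.length_set]; omega),
        List.getElem_set_ne (by omega), ← List.getD_eq_getElem _ _ hmlt, hprev']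
  have hself : ∀ v : List Int, (dp.set (m+1) v).getD (m+1) [] = v := by
    intro v
    rw [List.getD_eq_getElem _ _ (by simp [List.length_set]; omega)]
    simp
  simp only [hset, hself, getRow0, getRow1, getRow2, setRow1, setRow2,
    List.set_set, tripRow, htm]

def dpInit (n : Int) : List (List Int) :=
  PySem.List.pySetD
    ((PySem.List.pyRange 0 (n+1) 1).map (fun _ => (PySem.List.pyRange 0 3 1).map (fun _ => (0:Int))))
    1 [1, 1, 1]

theorem dpInit_eq (n : Int) :
    dpInit n = (List.replicate (n+1).toNat ([0,0,0] : List Int)).set 1 [1,1,1] := by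
  unfold dpInit
  rw [PySem.List.pySetD_of_nonneg _ _ (by norm_num)]
  have h3 : ((PySem.List.pyRange 0 3 1).map (fun _ => (0:Int))) = [0,0,0] := by decide
  simp only [h3, List.map_const', PySem.List.length_pyRange_one]
  norm_num

theorem foldA_inv (n : Int) (m : Nat) :
    1 ≤ m → (m : Int) ≤ n →
    ((PySem.List.pyRange 2 ((m:Int)+1) 1).foldl stepL (dpInit n)).length = (n+1).toNat ∧
    (∀ k : Nat, k < (n+1).toNat →
      ((PySem.List.pyRange 2 ((m:Int)+1) 1).foldl stepL (dpInit n)).getD k [] =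
        if 1 ≤ k ∧ k ≤ m then tripRow (k-1) else [0,0,0]) := by
  induction m with
  | zero => intro h; exact absurd h (by norm_num)
  | succ m ih =>
    intro _ hm
    by_cases hm1 : 1 ≤ m
    · -- inductive step: peel off i = m+1
      have hmn : (m : Int) ≤ n := by push_cast at hm ⊢; omega
      obtain ⟨ihlen, ihget⟩ := ih hm1 hmn
      have hrange : PySem.List.pyRange 2 (((m+1 : Nat) : Int)+1) 1 =
          PySem.List.pyRange 2 ((m:Int)+1) 1 ++ [(m:Int)+1] := by
        rw [show (((m+1 : Nat) : Int)+1) = ((m:Int)+1)+1 from by push_cast; ring]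
        exact PySem.List.pyRange_one_succ_right (show (2:Int) ≤ (m:Int)+1 by omega)
      rw [hrange, List.foldl_append, List.foldl_cons, List.foldl_nil]
      set prev := (PySem.List.pyRange 2 ((m:Int)+1) 1).foldl stepL (dpInit n) with hprevdef
      have hN : m + 1 < (n+1).toNat := by omega
      have hstep : stepL prev ((m:Int)+1) = prev.set (m+1) (tripRow m) := by
        apply stepL_set prev m hm1 (by omega)
        · rw [ihget m (by omega)]; simp [hm1]
        · rw [ihget (m+1) hN]; simp
      rw [hstep]
      refine ⟨by simp [List.length_set, ihlen], ?_⟩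
      intro k hk
      by_cases hkm : k = m + 1
      · subst hkm
        rw [List.getD_eq_getElem _ _ (by rw [List.length_set, ihlen]; omega)]
        simp [List.getElem_set_self]
      · rw [List.getD_eq_getElem _ _ (by rw [List.length_set, ihlen]; omega),
            List.getElem_set_ne (by omega), ← List.getD_eq_getElem _ _ (by rw [ihlen]; omega),
            ihget k hk]
        by_cases hk1 : 1 ≤ k
        · by_cases hkm' : k ≤ m
          · simp [hk1, hkm', show k ≤ m + 1 from by omega]
          · simp [hkm', show ¬ (k ≤ m + 1) from by omega]
        · simp [hk1]
    · -- base: m + 1 = 1, empty range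
      have hm0 : m = 0 := by omega
      subst hm0
      rw [show (((0+1 : Nat)):Int) + 1 = (2:Int) from by norm_num,
          PySem.List.pyRange_one_eq_nil (by omega), List.foldl_nil, dpInit_eq]
      have hlen : ((List.replicate (n+1).toNat ([0,0,0] : List Int)).set 1 [1,1,1]).length
          = (n+1).toNat := by simp
      refine ⟨hlen, ?_⟩
      intro k hk
      rw [List.getD_eq_getElem _ _ (by simp; omega)]
      by_cases hk1 : k = 1
      · subst hk1
        rw [List.getElem_set_self (by simp; omega)]
        simp [tripRow, trip]
      · rw [List.getElem_set_ne (by omega), List.getElem_replicate]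
        simp
        omega

theorem solve_eq_trip (n : Int) (hn : 1 ≤ n) :
    solve n = ((trip (n.toNat - 1)).1 + ((trip (n.toNat - 1)).2.1 +
      ((trip (n.toNat - 1)).2.2 + 0))) % 9901 := by
  obtain ⟨hlen, hget⟩ := foldA_inv n n.toNat (by omega) (by omega)
  have hfold : solve n = (PySem.List.pyGetD
      ((PySem.List.pyRange 2 ((n.toNat:Int)+1) 1).foldl stepL (dpInit n)) n []).sum % 9901 := by
    rw [show ((n.toNat:Int)+1) = n + 1 from by omega]
    unfold solve dpInit
    simp only [aSet_toArray, foldl_stepA_toArray, aGet_toArray]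
  rw [hfold, PySem.List.pyGetD_of_nonneg _ _ (by omega), hget n.toNat (by omega)]
  simp only [show 1 ≤ n.toNat from by omega, show n.toNat ≤ n.toNat from by omega, and_self,
    if_true]
  rw [tripRow]
  simp [List.sum_cons]

-- ===== VERDICT (by name: the statement is the Claim_ definition above) =====
theorem solve_spec : Claim_equal_solve := by
  intro n _ hpre
  unfold Spec_solve
  have hpre' : (1:Int) ≤ n := hpre
  have hA := solve_eq_trip n hpre'
  have h1 : ((solve n : Int) : ZMod 9901) = ((solve_alt n : Int) : ZMod 9901) := by
    rw [solve_alt_cast, hA,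
        show ((9901 : Int)) = ((9901 : Nat) : Int) from rfl, ZMod.intCast_mod]
    push_cast
    obtain ⟨t1, t2, t3⟩ := trip_cast (n.toNat - 1)
    rw [t1, t2, t3, show (n-1).toNat = n.toNat - 1 from by omega,
        show n.toNat - 1 + 1 = n.toNat from by omega]
    ring
  have e1 : solve n % 9901 = solve n := by
    rw [hA]; exact Int.emod_emod_of_dvd _ dvd_rfl
  have e2 : solve_alt n % 9901 = solve_alt n := by
    unfold solve_alt
    rcases powM (1,0,0,1) (2,1,1,0) (n-1).toNat with ⟨a,b,c,d⟩
    exact Int.emod_emod_of_dvd _ dvd_rfl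
  rw [ZMod.intCast_eq_intCast_iff'] at h1
  rw [show (((9901:Nat)):Int) = (9901:Int) from rfl] at h1
  rw [e1, e2] at h1
  exact h1
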